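/- GENERATED by farm/mkstatement.py from design/units.tsv (unit `start_decoder.R19`) and the assertions of Vorbis/Spec/StartDecoderB.lean — do not edit.
   THE STATEMENT of the proof unit `start_decoder.R19`: segment R19 of `start_decoder` (17 instructions; entries 0x11682e;
   exits 0x113b22; ranges 0x11682e-0x116878)
   takes each of its entry assertions to one of its exit assertions (`Vorbis.Spec.StartDecoder.SegR19`), given the contracts of its callees.
   What the names mean: Vorbis/Spec/Basic.lean (the shared hypotheses), Vorbis/Spec/StartDecoderB.lean (the assertions). The theorem to prove:
   `theorem start_decoder_R19_ok : Vorbis.Spec.start_decoder_R19.Statement`. -/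
import Vorbis.Spec.Alloc
import Vorbis.Spec.StartDecoderB
namespace Vorbis.Spec.start_decoder_R19
open X86 X86.User Asan

/-- The statement of unit `start_decoder.R19`. -/
def Statement : Prop :=
  ∀ (Lay : Layout) (_hLay : Lay.hi = 0x1000000) (μ : Microarch) (_hμ : UserX.MicroOK μ) (u₀ : State)
    (_hcode : HasCodeNat Lay u₀ Vorbis.L.start_decoder.entry Vorbis.Code.code_start_decoder.nat Vorbis.L.start_decoder.size)
    (_h_asan_load4_noabort : Asan.SmallCheck Lay μ Vorbis.WayInv (Vorbis.CodeOK u₀) [.rax, .rcx, .rdx] 4 Vorbis.L.__asan_load4_noabort.entry)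
    (_h_stb_vorbis_get_file_offset : ∀ (others : List Obj) (frames : List (Nat × FrameLayout)), Calls Lay μ Vorbis.WayInv (Vorbis.conv u₀) Vorbis.L.stb_vorbis_get_file_offset.entry (Vorbis.Spec.stb_vorbis_get_file_offset.spec others frames))
    (_h_asan_store4_noabort : Asan.SmallCheck Lay μ Vorbis.WayInv (Vorbis.CodeOK u₀) [.rax, .rcx, .rdx] 4 Vorbis.L.__asan_store4_noabort.entry),
    Vorbis.Spec.StartDecoder.SegR19 Lay μ u₀

end Vorbis.Spec.start_decoder_R19
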